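/- GENERATED by farm/mkstatement.py from design/units.tsv (unit `codebook_decode_scalar_raw.2`) and the assertions of Vorbis/Spec/Codebook/ScalarRaw.lean — do not edit.
   THE STATEMENT of the proof unit `codebook_decode_scalar_raw.2`: segment 2 of `codebook_decode_scalar_raw` (76 instructions; entries 0x10d62e;
   exits 0x10d775; ranges 0x10d62e-0x10d6aa + 0x10d6df-0x10d76e + 0x10d787-0x10d7bf)
   takes each of its entry assertions to one of its exit assertions (`Vorbis.Spec.ScalarRaw.Claim2`), given the contracts of its callees.
   What the names mean: Vorbis/Spec/Basic.lean (the shared hypotheses), Vorbis/Spec/Codebook/ScalarRaw.lean (the assertions). The theorem to prove: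
   `theorem codebook_decode_scalar_raw_2_ok : Vorbis.Spec.codebook_decode_scalar_raw_2.Statement`. -/
import Vorbis.Spec.Codebook.ScalarRaw
import Vorbis.Spec.Leaves2
namespace Vorbis.Spec.codebook_decode_scalar_raw_2
open X86 X86.User Asan

/-- The statement of unit `codebook_decode_scalar_raw.2`. -/
def Statement : Prop :=
  ∀ (Lay : Layout) (_hLay : Lay.hi = 0x1000000) (μ : Microarch) (_hμ : UserX.MicroOK μ) (u₀ : State)
    (_hcode : HasCodeNat Lay u₀ Vorbis.L.codebook_decode_scalar_raw.entry Vorbis.Code.code_codebook_decode_scalar_raw.nat Vorbis.L.codebook_decode_scalar_raw.size)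
    (_h_asan_load4_noabort : Asan.SmallCheck Lay μ Vorbis.WayInv (Vorbis.CodeOK u₀) [.rax, .rcx, .rdx] 4 Vorbis.L.__asan_load4_noabort.entry)
    (_h_bit_reverse : ∀ (others : List Obj) (frames : List (Nat × FrameLayout)), Calls Lay μ Vorbis.WayInv (Vorbis.conv u₀) Vorbis.L.bit_reverse.entry (Vorbis.Spec.bit_reverse.spec others frames))
    (_h_asan_load8_noabort : Asan.SmallCheck Lay μ Vorbis.WayInv (Vorbis.CodeOK u₀) [.rax, .rcx, .rdx] 8 Vorbis.L.__asan_load8_noabort.entry)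
    (_h_asan_load1_noabort : Asan.SmallCheck Lay μ Vorbis.WayInv (Vorbis.CodeOK u₀) [.rax, .rdx] 1 Vorbis.L.__asan_load1_noabort.entry)
    (_h_asan_store4_noabort : Asan.SmallCheck Lay μ Vorbis.WayInv (Vorbis.CodeOK u₀) [.rax, .rcx, .rdx] 4 Vorbis.L.__asan_store4_noabort.entry),
    Vorbis.Spec.ScalarRaw.Claim2 Lay μ u₀

end Vorbis.Spec.codebook_decode_scalar_raw_2
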